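-- pv_equiv track=rewrite | github.com/NicholasBermingham/Persistent_Cup_Length | python implementation.py | matrix_Multiplication_for_Sparse_Arrays
-- ===== SOURCE A (Python) =====
-- def matrix_Multiplication_for_Sparse_Arrays(A,B):
--     #Given the sparse matrix notation of oineus which lists columns with a nonzero entry assuming Z_2 coefficients, compute their matrix multiplication A.B
--     #I am assuming size A = size B
--     AB = []
--     m = len(B)
--     for j in range(m):
--         C = set([])
--         for i in B[j]:
--             C = C^set(A[i])
--         AB.append(list(C))
--     for i in range(m):
--         AB[i].sort()
--     return AB
-- ===== SOURCE B (Python) =====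
-- def matrix_Multiplication_for_Sparse_Arrays(A, B):
--     # Tally-then-filter-by-parity: count, per output column, how many times each
--     # row index is contributed; keep exactly the indices with odd count.
--     AB = []
--     for col in B:
--         rows = [r for i in col for r in set(A[i])]
--         cnt = {}
--         for r in rows:
--             cnt[r] = cnt.get(r, 0) + 1
--         AB.append(sorted(r for r, c in cnt.items() if c % 2 == 1))
--     return AB
-- ===== Notes on version B (the rewrite author's own statement) =====
-- stated objective: alternative
-- what changed: Replaces the incremental set symmetric-difference accumulator with a tally pass (a dict counting, per output column, how many deduplicated A[i] columns contain each row index) followed by a parity filter keeping the odd-count indices, then one sort.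
import Mathlib
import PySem

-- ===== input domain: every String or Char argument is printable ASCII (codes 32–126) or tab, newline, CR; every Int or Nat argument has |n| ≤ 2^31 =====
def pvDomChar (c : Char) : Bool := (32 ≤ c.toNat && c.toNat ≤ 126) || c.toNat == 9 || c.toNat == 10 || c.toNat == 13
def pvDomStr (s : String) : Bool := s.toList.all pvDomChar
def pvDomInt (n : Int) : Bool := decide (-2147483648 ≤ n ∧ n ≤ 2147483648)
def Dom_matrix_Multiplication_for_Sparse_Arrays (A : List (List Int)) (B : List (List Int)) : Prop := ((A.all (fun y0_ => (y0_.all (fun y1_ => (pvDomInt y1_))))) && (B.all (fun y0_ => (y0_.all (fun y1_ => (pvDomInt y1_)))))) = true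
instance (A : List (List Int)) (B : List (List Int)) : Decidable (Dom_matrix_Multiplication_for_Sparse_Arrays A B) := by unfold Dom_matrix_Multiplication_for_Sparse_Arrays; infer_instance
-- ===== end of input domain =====

-- B replaces A's incremental set-XOR accumulator by a tally-then-filter-by-parity pass (alternative decomposition, similar cost).

-- ===== PORT A =====
def matrix_Multiplication_for_Sparse_Arrays (A : List (List Int)) (B : List (List Int)) : List (List Int) :=
  let m : Int := B.length
  -- for j in range(m): C = set(); for i in B[j]: C = C ^ set(A[i]); AB.append(list(C))
  let AB : List (List Int) :=
    (PySem.List.pyRange 0 m 1).foldl (fun AB j =>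
      AB ++ [ (PySem.List.pyGetD B j []).foldl
                (fun C i => PySem.Set.symmDiff C (PySem.Set.ofList (PySem.List.pyGetD A i [])))
                PySem.Set.empty ]) []
  -- for i in range(m): AB[i].sort()
  (PySem.List.pyRange 0 m 1).foldl (fun ys i =>
    PySem.List.pySetD ys i (PySem.List.sorted (PySem.List.pyGetD ys i []) (fun x => x) false)) AB

-- ===== PORT B =====
def matrix_Multiplication_for_Sparse_Arrays_alt (A : List (List Int)) (B : List (List Int)) : List (List Int) :=
  B.foldl (fun AB col =>
    let rows : List Int := col.flatMap (fun i => PySem.Set.ofList (PySem.List.pyGetD A i []))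
    let cnt : PySem.Dict Int Int := rows.foldl (fun d r => d.modify r 0 (· + 1)) PySem.Dict.empty
    AB ++ [ PySem.List.sorted ((cnt.items.filter (fun p => PySem.Int.mod p.2 2 == 1)).map (·.1)) (fun x => x) false ]) []

-- ===== PRECONDITION & SPEC =====
-- Pre_ excludes exactly the inputs on which Python A raises IndexError: some i in some B[j] outside [-len(A), len(A)).
def Pre_matrix_Multiplication_for_Sparse_Arrays (A : List (List Int)) (B : List (List Int)) : Prop :=
  ∀ col ∈ B, ∀ i ∈ col, -(A.length : Int) ≤ i ∧ i < A.length
instance (A : List (List Int)) (B : List (List Int)) : Decidable (Pre_matrix_Multiplication_for_Sparse_Arrays A B) := by unfold Pre_matrix_Multiplication_for_Sparse_Arrays; infer_instance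
def pvWitness_matrix_Multiplication_for_Sparse_Arrays : List (List Int) × List (List Int) := ([[0, 1], [1]], [[0, 1], [1, 1]])
def Spec_matrix_Multiplication_for_Sparse_Arrays (A : List (List Int)) (B : List (List Int)) (out : List (List Int)) : Prop := out = matrix_Multiplication_for_Sparse_Arrays_alt A B
instance (A : List (List Int)) (B : List (List Int)) (out : List (List Int)) : Decidable (Spec_matrix_Multiplication_for_Sparse_Arrays A B out) := by unfold Spec_matrix_Multiplication_for_Sparse_Arrays; infer_instance

-- ===== CLAIM (what is proved, stated in full; the proofs are below) =====
def Claim_equal_matrix_Multiplication_for_Sparse_Arrays : Prop := ∀ (A : List (List Int)) (B : List (List Int)), Dom_matrix_Multiplication_for_Sparse_Arrays A B → Pre_matrix_Multiplication_for_Sparse_Arrays A B → Spec_matrix_Multiplication_for_Sparse_Arrays A B (matrix_Multiplication_for_Sparse_Arrays A B)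

-- ===== LEMMAS AND PROOFS =====

-- A's second loop ('for i in range(m): AB[i].sort()') applies f to each entry in place.
theorem pv_sortEach (f : List Int → List Int) :
    ∀ (suf pre : List (List Int)),
    (PySem.List.pyRange (pre.length : Int) ((pre.length : Int) + suf.length) 1).foldl
      (fun ys i => PySem.List.pySetD ys i (f (PySem.List.pyGetD ys i []))) (pre ++ suf)
    = pre ++ suf.map f := by
  intro suf
  induction suf with
  | nil => intro pre; simp [PySem.List.pyRange]
  | cons s t ih =>
    intro pre
    rw [PySem.List.pyRange_one_cons (by simp only [List.length_cons]; push_cast; omega)]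
    simp only [List.foldl_cons]
    have hget : PySem.List.pyGetD (pre ++ s :: t) (pre.length : Int) [] = s := by
      rw [PySem.List.pyGetD_natCast]; simp
    have hset : PySem.List.pySetD (pre ++ s :: t) (pre.length : Int) (f s) = (pre ++ [f s]) ++ t := by
      rw [PySem.List.pySetD_natCast]; simp [List.set_append_right]
    rw [hget, hset]
    have h2 := ih (pre ++ [f s])
    simp only [List.length_append, List.length_cons, List.length_nil] at h2
    push_cast at h2
    norm_num at h2
    have harg : (pre.length : Int) + ((t.length : Int) + 1) = (pre.length : Int) + 1 + (t.length : Int) := by ring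
    simp only [List.length_cons]
    push_cast
    rw [harg]
    simpa [List.append_assoc] using h2

theorem pv_xorNodup (S : Int → List Int) (hS : ∀ i, (S i).Nodup) :
    ∀ (col : List Int) (C : List Int), C.Nodup →
      (col.foldl (fun C i => PySem.Set.symmDiff C (S i)) C).Nodup := by
  intro col
  induction col with
  | nil => intro C h; simpa using h
  | cons i t ih => intro C h; exact ih _ (PySem.Set.nodup_symmDiff C (S i) h (hS i))

-- membership in the running XOR accumulator = parity of the number of contributions so far
theorem pv_xorMem (S : Int → List Int) (hS : ∀ i, (S i).Nodup) (r : Int) :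
    ∀ (col : List Int) (C : List Int), C.Nodup →
      (r ∈ col.foldl (fun C i => PySem.Set.symmDiff C (S i)) C ↔
        ((r ∈ C) ↔ (col.flatMap S).count r % 2 = 0)) := by
  intro col
  induction col with
  | nil => intro C h; simp
  | cons i t ih =>
    intro C h
    simp only [List.foldl_cons]
    rw [ih _ (PySem.Set.nodup_symmDiff C (S i) h (hS i))]
    have hmem : r ∈ PySem.Set.symmDiff C (S i) ↔ ((r ∈ C ∧ r ∉ S i) ∨ (r ∈ S i ∧ r ∉ C)) :=
      PySem.Set.mem_symmDiff ..
    have hcount : ((i :: t).flatMap S).count r = (S i).count r + (t.flatMap S).count r := by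
      simp [List.flatMap_cons, List.count_append]
    have hci : (S i).count r = if r ∈ S i then 1 else 0 := by
      split_ifs with hri
      · exact List.count_eq_one_of_mem (hS i) hri
      · exact List.count_eq_zero_of_not_mem hri
    rw [hmem, hcount, hci]
    by_cases hri : r ∈ S i <;> by_cases hrc : r ∈ C <;> simp [hri, hrc] <;> omega

-- one output column: sorted XOR-fold = sorted odd-count filter of the tally
theorem pv_colEq (S : Int → List Int) (hS : ∀ i, (S i).Nodup) (col : List Int) :
    PySem.List.sorted
      (col.foldl (fun C i => PySem.Set.symmDiff C (S i)) PySem.Set.empty) (fun x => x) false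
    = PySem.List.sorted
        ((((col.flatMap S).foldl (fun d r => d.modify r 0 (· + 1)) PySem.Dict.empty).items.filter
            (fun p => PySem.Int.mod p.2 2 == 1)).map (·.1)) (fun x => x) false := by
  rw [← PySem.Dict.counter_eq_foldl, PySem.Dict.items_counter, List.filter_map, List.map_map]
  have hfun : ((·.1) ∘ fun k => (k, (((col.flatMap S).count k : Int)))) = (id : Int → Int) := rfl
  rw [hfun, List.map_id]
  rw [show (PySem.Set.empty : PySem.Set Int) = [] from rfl]
  rw [PySem.List.sorted_id_eq_sorted_id_iff_perm]
  rw [List.perm_ext_iff_of_nodup (pv_xorNodup S hS col [] (by simp))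
    ((PySem.Set.nodup_ofList (col.flatMap S)).filter _)]
  intro r
  rw [pv_xorMem S hS r col [] (by simp)]
  simp only [List.mem_filter, PySem.Set.mem_ofList, Function.comp]
  have hmod : ∀ n : Nat, (PySem.Int.mod (n : Int) 2 == 1) = true ↔ n % 2 = 1 := by
    intro n
    simp only [PySem.Int.mod, beq_iff_eq]
    simp [Int.fmod_eq_emod]
    omega
  rw [hmod]
  have hpos : (col.flatMap S).count r % 2 = 1 → r ∈ col.flatMap S := by
    intro h1
    by_contra hne
    rw [List.count_eq_zero_of_not_mem hne] at h1
    omega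
  constructor
  · intro hodd
    have : ¬ ((col.flatMap S).count r % 2 = 0) := fun h => by simpa using hodd.mpr h
    exact ⟨hpos (by omega), by omega⟩
  · rintro ⟨-, hc⟩
    simp only [List.not_mem_nil, false_iff]
    omega

-- ===== VERDICT (by name: the statement is the Claim_ definition above) =====
theorem matrix_Multiplication_for_Sparse_Arrays_spec : Claim_equal_matrix_Multiplication_for_Sparse_Arrays := by
  intro A B _ _
  unfold Spec_matrix_Multiplication_for_Sparse_Arrays
  unfold matrix_Multiplication_for_Sparse_Arrays matrix_Multiplication_for_Sparse_Arrays_alt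
  simp only []
  rw [PySem.List.foldl_pyRange_zero_pyGetD' B [] (fun acc x => acc ++
    [x.foldl (fun C i => PySem.Set.symmDiff C (PySem.Set.ofList (PySem.List.pyGetD A i []))) PySem.Set.empty]) []]
  rw [PySem.List.foldl_append_singleton_eq_map, PySem.List.foldl_append_singleton_eq_map]
  set g := fun col : List Int =>
    col.foldl (fun C i => PySem.Set.symmDiff C (PySem.Set.ofList (PySem.List.pyGetD A i []))) PySem.Set.empty with hg
  have hlen : (B.length : Int) = (((B.map g).length : Nat) : Int) := by simp
  have h2 := pv_sortEach (fun l => PySem.List.sorted l (fun x => x) false) (B.map g) []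
  simp only [List.length_nil, Nat.cast_zero, zero_add, List.nil_append] at h2
  simp only [List.nil_append]
  rw [hlen, h2, List.map_map]
  congr 1
  funext col
  exact pv_colEq (fun i => PySem.Set.ofList (PySem.List.pyGetD A i []))
    (fun i => PySem.Set.nodup_ofList _) col
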